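-- pv_equiv track=rewrite | github.com/michalK00/python_lab | L3/fun_E.py | get_failed_reads
-- ===== SOURCE A (Python) =====
-- def get_failed_reads(list_of_tuples, if_extended_lists=True):
--     list_of_4xx = []
--     list_of_5xx = []
--
--     for tuple_of_log in list_of_tuples:  # (url, date, path, status_code, bit_size)
--         if tuple_of_log[3] // 100 == 4:
--             list_of_4xx.append(tuple_of_log)
--         elif tuple_of_log[3] // 100 == 5:
--             list_of_5xx.append(tuple_of_log)
--
--     if if_extended_lists:
--         return list_of_4xx + list_of_5xx
--     else:
--         return list_of_4xx, list_of_5xx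
-- ===== SOURCE B (Python) =====
-- def get_failed_reads(list_of_tuples, if_extended_lists=True):
--     # staged passes: filter the input twice, once per status class
--     list_of_4xx = [t for t in list_of_tuples if t[3] // 100 == 4]
--     list_of_5xx = [t for t in list_of_tuples if t[3] // 100 == 5]
--     if if_extended_lists:
--         return list_of_4xx + list_of_5xx
--     else:
--         return list_of_4xx, list_of_5xx
-- ===== Notes on version B (the rewrite author's own statement) =====
-- stated objective: idiomatic
-- what changed: B replaces A's single pass with two named if/elif accumulators by two staged filter comprehensions over the input, one per status class, with no mutable accumulator state.
import Mathlib
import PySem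

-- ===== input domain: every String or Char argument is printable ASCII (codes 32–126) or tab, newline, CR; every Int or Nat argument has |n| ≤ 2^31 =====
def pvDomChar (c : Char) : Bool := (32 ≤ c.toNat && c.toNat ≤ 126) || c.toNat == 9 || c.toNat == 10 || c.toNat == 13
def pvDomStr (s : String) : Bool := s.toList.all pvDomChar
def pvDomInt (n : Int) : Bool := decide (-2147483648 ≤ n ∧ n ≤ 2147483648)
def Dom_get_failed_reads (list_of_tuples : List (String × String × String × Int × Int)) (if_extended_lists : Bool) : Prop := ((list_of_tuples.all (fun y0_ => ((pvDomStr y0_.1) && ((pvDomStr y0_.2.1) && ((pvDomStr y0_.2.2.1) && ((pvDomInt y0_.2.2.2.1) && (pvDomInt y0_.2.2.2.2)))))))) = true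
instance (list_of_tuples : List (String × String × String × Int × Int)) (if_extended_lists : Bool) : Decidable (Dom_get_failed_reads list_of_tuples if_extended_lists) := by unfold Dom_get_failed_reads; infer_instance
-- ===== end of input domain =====

-- B replaces A's single pass with two if/elif accumulators by two staged filter
-- comprehensions, one per status class (objective: idiomatic); same order, same buckets.

-- ===== PORT A =====
-- literal port of A's loop: two accumulator lists, if / elif on status_code // 100
def get_failed_reads (list_of_tuples : List (String × String × String × Int × Int)) (if_extended_lists : Bool) : List (String × String × String × Int × Int) :=
  let acc := list_of_tuples.foldl
    (fun (acc : List (String × String × String × Int × Int) × List (String × String × String × Int × Int)) t =>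
      if PySem.Int.floordiv t.2.2.2.1 100 == 4 then (acc.1 ++ [t], acc.2)
      else if PySem.Int.floordiv t.2.2.2.1 100 == 5 then (acc.1, acc.2 ++ [t])
      else acc)
    ([], [])
  if if_extended_lists then acc.1 ++ acc.2
  else []  -- Python returns a TUPLE of two lists here, not a value of the declared type; outside Pre_

-- ===== PORT B =====
-- literal port of Source B: two staged filter comprehensions, then concatenate
def get_failed_reads_alt (list_of_tuples : List (String × String × String × Int × Int)) (if_extended_lists : Bool) : List (String × String × String × Int × Int) :=
  let list_of_4xx := list_of_tuples.filter (fun t => PySem.Int.floordiv t.2.2.2.1 100 == 4)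
  let list_of_5xx := list_of_tuples.filter (fun t => PySem.Int.floordiv t.2.2.2.1 100 == 5)
  if if_extended_lists then list_of_4xx ++ list_of_5xx
  else []  -- Python returns a TUPLE of two lists here, not a value of the declared type; outside Pre_

-- ===== PRECONDITION & SPEC =====
-- Pre_ excludes if_extended_lists = False only because there A (and B) return a TUPLE of two lists,
-- which is not a value of the declared List return type and cannot be ported under the type convention.
def Pre_get_failed_reads (list_of_tuples : List (String × String × String × Int × Int)) (if_extended_lists : Bool) : Prop := if_extended_lists = true
instance (list_of_tuples : List (String × String × String × Int × Int)) (if_extended_lists : Bool) : Decidable (Pre_get_failed_reads list_of_tuples if_extended_lists) := by unfold Pre_get_failed_reads; infer_instance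
def pvWitness_get_failed_reads : (List (String × String × String × Int × Int)) × Bool := ([("u", "d", "p", 404, 1), ("v", "e", "q", 500, 2), ("w", "f", "r", 200, 3)], true)

def Spec_get_failed_reads (list_of_tuples : List (String × String × String × Int × Int)) (if_extended_lists : Bool) (out : List (String × String × String × Int × Int)) : Prop := out = get_failed_reads_alt list_of_tuples if_extended_lists
instance (list_of_tuples : List (String × String × String × Int × Int)) (if_extended_lists : Bool) (out : List (String × String × String × Int × Int)) : Decidable (Spec_get_failed_reads list_of_tuples if_extended_lists out) := by unfold Spec_get_failed_reads; infer_instance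

-- ===== CLAIM (what is proved, stated in full; the proofs are below) =====
def Claim_equal_get_failed_reads : Prop := ∀ (list_of_tuples : List (String × String × String × Int × Int)) (if_extended_lists : Bool), Dom_get_failed_reads list_of_tuples if_extended_lists → Pre_get_failed_reads list_of_tuples if_extended_lists → Spec_get_failed_reads list_of_tuples if_extended_lists (get_failed_reads list_of_tuples if_extended_lists)

-- ===== LEMMAS AND PROOFS =====

-- A's accumulator loop (generic key) appends the filtered elements behind the initial accumulators
theorem foldA_eq {α : Type} (key : α → Int) (l : List α) (l4 l5 : List α) :
    l.foldl
      (fun (acc : List α × List α) t =>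
        if key t == 4 then (acc.1 ++ [t], acc.2)
        else if key t == 5 then (acc.1, acc.2 ++ [t])
        else acc)
      (l4, l5)
    = (l4 ++ l.filter (fun t => key t == 4), l5 ++ l.filter (fun t => key t == 5)) := by
  induction l generalizing l4 l5 with
  | nil => simp
  | cons t l ih =>
    by_cases h4 : key t = 4
    · simpa [h4, List.filter_cons] using ih (l4 ++ [t]) l5
    · by_cases h5 : key t = 5
      · simpa [h4, h5, List.filter_cons] using ih l4 (l5 ++ [t])
      · simpa [h4, h5, List.filter_cons] using ih l4 l5

-- ===== VERDICT (by name: the statement is the Claim_ definition above) =====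
theorem get_failed_reads_spec : Claim_equal_get_failed_reads := by
  intro l b _ hpre
  unfold Pre_get_failed_reads at hpre
  subst hpre
  unfold Spec_get_failed_reads get_failed_reads get_failed_reads_alt
  simp only [foldA_eq (fun t => PySem.Int.floordiv t.2.2.2.1 100) l [] [],
    List.nil_append, if_true]
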